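-- pv_equiv track=rewrite | github.com/pypi-data/pypi-mirror-404 | packages/coiled/coiled-1.130.4-py3-none-any.whl/coiled/v2/cwi_log_link.py | cloudwatch_url
-- ===== SOURCE A (Python) =====
-- def cloudwatch_url(slug, cluster_name, region):
--     def escape(s):
--         for c in s:
--             if c.isalpha() or c.isdigit() or c in ["-", "."]:
--                 continue
--             c_hex = "*{0:02x}".format(ord(c))
--             s = s.replace(c, c_hex)
--         return s
--
--     def gen_log_insights_url(params):
--         S1 = "$257E"
--         S2 = "$2528"
--         S3 = "$2527"
--         S4 = "$2529"
--
--         res = f"{S1}{S2}"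
--         for k in params:
--             value = params[k]
--             if isinstance(value, str):
--                 value = escape(value)
--             elif isinstance(value, list):
--                 for i in range(len(value)):
--                     value[i] = escape(value[i])
--             prefix = S1 if list(params.items())[0][0] != k else ""
--             suffix = f"{S1}{S3}"
--             if isinstance(value, list):
--                 value = "".join([f"{S1}{S3}{n}" for n in value])
--                 suffix = f"{S1}{S2}"
--             elif isinstance(value, int) or isinstance(value, bool):
--                 value = str(value).lower()
--                 suffix = S1
--
--             res += f"{prefix}{k}{suffix}{value}"
--         res += f"{S4}{S4}"
--         QUERY = f"logsV2:logs-insights$3Ftab$3Dlogs$26queryDetail$3D{res}"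
--         return f"https://{region}.console.aws.amazon.com/cloudwatch/home?region={region}#{QUERY}"
--
--     editorString = (
--         f"fields @timestamp, @message\n| sort @timestamp desc\n| filter @logStream like /^{cluster_name}/\n| limit 200"
--     )
--
--     params = {
--         "end": 0,
--         "start": -60 * 60 * 24,  # 1 day ago
--         "unit": "seconds",
--         "timeType": "RELATIVE",  # "ABSOLUTE",  # OR RELATIVE and end = 0 and start is negative  seconds
--         "tz": "Local",  # OR "UTC"
--         "editorString": editorString,
--         "source": [slug],
--     }
--     return gen_log_insights_url(params)
-- ===== SOURCE B (Python) =====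
-- def cloudwatch_url(slug, cluster_name, region):
--     # Escape each character once: keep alphanumerics, '-' and '.', hex-encode the rest.
--     def escape(s):
--         return "".join(
--             c if (c.isalpha() or c.isdigit() or c in "-.") else "*{0:02x}".format(ord(c))
--             for c in s
--         )
--
--     S1, S2, S3, S4 = "$257E", "$2528", "$2527", "$2529"
--     editorString = (
--         f"fields @timestamp, @message\n| sort @timestamp desc\n| filter @logStream like /^{cluster_name}/\n| limit 200"
--     )
--     query_detail = (
--         S1 + S2
--         + "end" + S1 + "0"
--         + S1 + "start" + S1 + "-86400"
--         + S1 + "unit" + S1 + S3 + "seconds"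
--         + S1 + "timeType" + S1 + S3 + "RELATIVE"
--         + S1 + "tz" + S1 + S3 + "Local"
--         + S1 + "editorString" + S1 + S3 + escape(editorString)
--         + S1 + "source" + S1 + S2 + S1 + S3 + escape(slug)
--         + S4 + S4
--     )
--     query = f"logsV2:logs-insights$3Ftab$3Dlogs$26queryDetail$3D{query_detail}"
--     return f"https://{region}.console.aws.amazon.com/cloudwatch/home?region={region}#{query}"
-- ===== Notes on version B (the rewrite author's own statement) =====
-- stated objective: simpler
-- what changed: The constant params dict with its isinstance-dispatch loop is replaced by straight-line concatenation of the fixed query entries, and escape maps each character once to itself or its *hex code instead of repeated whole-string replace passes.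
-- intended difference: When slug contains a '*' preceded by another escaped character, or cluster_name contains '*', A's whole-string replace re-escapes the '*' introduced by earlier escapes (e.g. ' *' becomes '*2a20*2a'), while B escapes each character exactly once ('*20*2a'), which is the decodable intended escaping. — e.g. on cloudwatch_url(" *", "c", "r"): A returns "https://r.console.aws.amazon.com/cloudwatch/home?region=r#logsV2:logs-insights$3Ftab$3Dlogs$26queryDetail$3D$257E$2528…, B returns "https://r.console.aws.amazon.com/cloudwatch/home?region=r#logsV2:logs-insights$3Ftab$3Dlogs$26queryDetail$3D$257E$2528…
import Mathlib
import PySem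

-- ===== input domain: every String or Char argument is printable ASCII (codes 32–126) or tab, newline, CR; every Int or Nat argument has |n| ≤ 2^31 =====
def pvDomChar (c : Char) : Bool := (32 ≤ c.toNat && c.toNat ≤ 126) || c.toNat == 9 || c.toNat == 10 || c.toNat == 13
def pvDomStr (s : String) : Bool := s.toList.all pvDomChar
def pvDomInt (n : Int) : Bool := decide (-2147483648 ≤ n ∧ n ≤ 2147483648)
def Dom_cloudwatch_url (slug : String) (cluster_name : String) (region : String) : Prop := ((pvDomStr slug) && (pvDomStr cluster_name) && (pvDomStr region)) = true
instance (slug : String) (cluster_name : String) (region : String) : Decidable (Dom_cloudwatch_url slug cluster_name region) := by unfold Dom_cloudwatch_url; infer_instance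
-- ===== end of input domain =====

-- B replaces the constant params dict and its isinstance-dispatch loop by straight-line
-- concatenation of the fixed query entries, and escapes each character once (char → itself or
-- *hex) instead of A's repeated whole-string replace passes; on inputs where A's passes
-- re-escape a previously introduced '*' the two differ, stated below as D_.

-- shared helpers: the escape alphabet and "*{0:02x}".format(ord(c))
def pvPlain (c : Char) : Bool :=
  PySem.Chars.isalpha c || PySem.Chars.isdigit c || (c == '-' || c == '.')

def pvHexDig (k : Nat) : Char := if k < 10 then Char.ofNat (48 + k) else Char.ofNat (87 + k)

-- "*{0:02x}".format(ord(c)) : exact for code points < 256 (Dom restricts chars to ≤ 126)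
def pvCHex (c : Char) : List Char := ['*', pvHexDig (c.toNat / 16), pvHexDig (c.toNat % 16)]

-- ===== PORT A =====

-- A's escape: `for c in s` iterates the ORIGINAL s; each special c is replaced in the
-- whole current string (s is rebound), exactly as in the Python.
def pvEscapeA (s : String) : String :=
  s.toList.foldl (fun t c =>
    if pvPlain c then t
    else PySem.Str.replace t (String.ofList [c]) (String.ofList (pvCHex c))) s

-- heterogeneous value type of A's params dict (int / str / list[str])
inductive PVVal where
  | vint : Int → PVVal
  | vstr : String → PVVal
  | vlist : List String → PVVal

-- gen_log_insights_url: the params dict is a literal with distinct keys, so `for k in params`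
-- with `value = params[k]` is the fold over its entries; `list(params.items())[0][0]` is
-- pyGet? params 0 (params is never empty where A calls this).
def pvGen (region : String) (params : List (String × PVVal)) : String :=
  let S1 := "$257E"
  let S2 := "$2528"
  let S3 := "$2527"
  let S4 := "$2529"
  let res := S1 ++ S2
  let res := params.foldl (fun res kv =>
    let k := kv.1
    let value := match kv.2 with
      | PVVal.vstr v => PVVal.vstr (pvEscapeA v)
      | PVVal.vlist l => PVVal.vlist (l.map pvEscapeA)
      | v => v
    let pfx := if ((PySem.List.pyGet? params 0).map Prod.fst) ≠ some k then S1 else ""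
    match value with
    | PVVal.vlist l =>
        res ++ pfx ++ k ++ (S1 ++ S2) ++ PySem.Str.join "" (l.map (fun n => S1 ++ S3 ++ n))
    | PVVal.vint i =>
        res ++ pfx ++ k ++ S1 ++ PySem.Str.lower (PySem.Int.toStr i)
    | PVVal.vstr v =>
        res ++ pfx ++ k ++ (S1 ++ S3) ++ v) res
  let res := res ++ (S4 ++ S4)
  let q := "logsV2:logs-insights$3Ftab$3Dlogs$26queryDetail$3D" ++ res
  "https://" ++ region ++ ".console.aws.amazon.com/cloudwatch/home?region=" ++ region ++ "#" ++ q

def cloudwatch_url (slug : String) (cluster_name : String) (region : String) : String :=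
  let editorString := "fields @timestamp, @message\n| sort @timestamp desc\n| filter @logStream like /^" ++ cluster_name ++ "/\n| limit 200"
  let params : List (String × PVVal) :=
    [("end", PVVal.vint 0),
     ("start", PVVal.vint (-60 * 60 * 24)),
     ("unit", PVVal.vstr "seconds"),
     ("timeType", PVVal.vstr "RELATIVE"),
     ("tz", PVVal.vstr "Local"),
     ("editorString", PVVal.vstr editorString),
     ("source", PVVal.vlist [slug])]
  pvGen region params

-- ===== PORT B =====

-- B's escape: each character once, to itself or its *hex code
def pvEsc1 (c : Char) : List Char := if pvPlain c then [c] else pvCHex c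

def pvEscapeB (s : String) : String := String.ofList (s.toList.flatMap pvEsc1)

def cloudwatch_url_alt (slug : String) (cluster_name : String) (region : String) : String :=
  let S1 := "$257E"
  let S2 := "$2528"
  let S3 := "$2527"
  let S4 := "$2529"
  let editorString := "fields @timestamp, @message\n| sort @timestamp desc\n| filter @logStream like /^" ++ cluster_name ++ "/\n| limit 200"
  let query_detail := S1 ++ S2
      ++ "end" ++ S1 ++ "0"
      ++ S1 ++ "start" ++ S1 ++ "-86400"
      ++ S1 ++ "unit" ++ S1 ++ S3 ++ "seconds"
      ++ S1 ++ "timeType" ++ S1 ++ S3 ++ "RELATIVE"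
      ++ S1 ++ "tz" ++ S1 ++ S3 ++ "Local"
      ++ S1 ++ "editorString" ++ S1 ++ S3 ++ pvEscapeB editorString
      ++ S1 ++ "source" ++ S1 ++ S2 ++ S1 ++ S3 ++ pvEscapeB slug
      ++ S4 ++ S4
  let q := "logsV2:logs-insights$3Ftab$3Dlogs$26queryDetail$3D" ++ query_detail
  "https://" ++ region ++ ".console.aws.amazon.com/cloudwatch/home?region=" ++ region ++ "#" ++ q

-- ===== PRECONDITION & SPEC =====

-- When slug contains a '*' preceded by another escaped character, or cluster_name contains '*',
-- A's whole-string replace re-escapes the '*' introduced by earlier escapes (e.g. ' *' becomes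
-- "*2a20*2a"), while B escapes each character exactly once ("*20*2a"), the decodable intended escaping.
def D_cloudwatch_url (slug : String) (cluster_name : String) (region : String) : Prop :=
  '*' ∈ ((slug.toList.filter (fun c => !pvPlain c)).drop 1) ∨ '*' ∈ cluster_name.toList
instance (slug : String) (cluster_name : String) (region : String) : Decidable (D_cloudwatch_url slug cluster_name region) := by unfold D_cloudwatch_url; infer_instance

def Spec_cloudwatch_url (slug : String) (cluster_name : String) (region : String) (out : String) : Prop := ¬ D_cloudwatch_url slug cluster_name region → out = cloudwatch_url_alt slug cluster_name region
instance (slug : String) (cluster_name : String) (region : String) (out : String) : Decidable (Spec_cloudwatch_url slug cluster_name region out) := by unfold Spec_cloudwatch_url; infer_instance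

def pvDiffWitness_cloudwatch_url : String × String × String := (" *", "c", "r")
def pvDiffWitnessOut_cloudwatch_url : String × String :=
  ("https://r.console.aws.amazon.com/cloudwatch/home?region=r#logsV2:logs-insights$3Ftab$3Dlogs$26queryDetail$3D$257E$2528end$257E0$257Estart$257E-86400$257Eunit$257E$2527seconds$257EtimeType$257E$2527RELATIVE$257Etz$257E$2527Local$257EeditorString$257E$2527fields*20*40timestamp*2c*20*40message*0a*7c*20sort*20*40timestamp*20desc*0a*7c*20filter*20*40logStream*20like*20*2f*5ec*2f*0a*7c*20limit*20200$257Esource$257E$2528$257E$2527*2a20*2a$2529$2529",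
   "https://r.console.aws.amazon.com/cloudwatch/home?region=r#logsV2:logs-insights$3Ftab$3Dlogs$26queryDetail$3D$257E$2528end$257E0$257Estart$257E-86400$257Eunit$257E$2527seconds$257EtimeType$257E$2527RELATIVE$257Etz$257E$2527Local$257EeditorString$257E$2527fields*20*40timestamp*2c*20*40message*0a*7c*20sort*20*40timestamp*20desc*0a*7c*20filter*20*40logStream*20like*20*2f*5ec*2f*0a*7c*20limit*20200$257Esource$257E$2528$257E$2527*20*2a$2529$2529")

-- ===== CLAIM (what is proved, stated in full; the proofs are below) =====
def Claim_unchanged_cloudwatch_url : Prop := ∀ (slug : String) (cluster_name : String) (region : String), Dom_cloudwatch_url slug cluster_name region → Spec_cloudwatch_url slug cluster_name region (cloudwatch_url slug cluster_name region)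
def Claim_changed_cloudwatch_url : Prop := Dom_cloudwatch_url (pvDiffWitness_cloudwatch_url.1) (pvDiffWitness_cloudwatch_url.2.1) (pvDiffWitness_cloudwatch_url.2.2) ∧ D_cloudwatch_url (pvDiffWitness_cloudwatch_url.1) (pvDiffWitness_cloudwatch_url.2.1) (pvDiffWitness_cloudwatch_url.2.2) ∧ cloudwatch_url (pvDiffWitness_cloudwatch_url.1) (pvDiffWitness_cloudwatch_url.2.1) (pvDiffWitness_cloudwatch_url.2.2) = pvDiffWitnessOut_cloudwatch_url.1 ∧ cloudwatch_url_alt (pvDiffWitness_cloudwatch_url.1) (pvDiffWitness_cloudwatch_url.2.1) (pvDiffWitness_cloudwatch_url.2.2) = pvDiffWitnessOut_cloudwatch_url.2 ∧ pvDiffWitnessOut_cloudwatch_url.1 ≠ pvDiffWitnessOut_cloudwatch_url.2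

-- ===== LEMMAS AND PROOFS =====

-- the per-character substitution step
def pvSub (c : Char) (x : Char) : List Char := if x == c then pvCHex c else [x]

-- composition of the substitutions for an event list, on a whole string
def pvF (ev : List Char) (t : List Char) : List Char :=
  ev.foldl (fun t c => t.flatMap (pvSub c)) t

-- Python str.replace with a single-character pattern acts character-wise
lemma pv_go_single (c : Char) (r : List Char) :
    ∀ (l : List Char) (fuel : Nat) (acc : List Char), l.length ≤ fuel →
    PySem.Chars.replace.go [c] r fuel l acc
      = acc.reverse ++ l.flatMap (fun x => if x == c then r else [x]) := by
  intro l
  induction l with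
  | nil =>
    intro fuel acc _
    cases fuel <;> simp [PySem.Chars.replace.go]
  | cons x t ih =>
    intro fuel acc hle
    cases fuel with
    | zero => simp at hle
    | succ m =>
      rw [PySem.Chars.replace.go]
      by_cases hcx : c = x
      · subst hcx
        simp only [List.isPrefixOf, BEq.rfl, Bool.and_self, if_pos]
        simp only [List.length_cons, List.length_nil, List.drop_succ_cons, List.drop_zero]
        rw [ih m (r.reverse ++ acc) (by simpa using Nat.le_of_succ_le_succ hle)]
        simp
      · have : ([c].isPrefixOf (x :: t)) = false := by
          simp [List.isPrefixOf, hcx]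
        rw [this]
        simp only [Bool.false_eq_true]
        rw [ih m (x :: acc) (by simpa using Nat.le_of_succ_le_succ hle)]
        have hxc : ¬ (x = c) := Ne.symm hcx
        simp [hxc]

lemma pv_replace_single (t : List Char) (c : Char) (r : List Char) :
    PySem.Chars.replace t [c] r = t.flatMap (fun x => if x == c then r else [x]) := by
  rw [PySem.Chars.replace]
  simp only [List.isEmpty_cons, Bool.false_eq_true]
  simpa using pv_go_single c r t t.length [] le_rfl

-- the composed substitution acts independently on each character
lemma pvF_flatMap (ev : List Char) : ∀ (t : List Char),
    pvF ev t = t.flatMap (fun x => pvF ev [x]) := by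
  induction ev with
  | nil => intro t; simp [pvF]
  | cons c rest ih =>
    intro t
    have h1 : pvF (c :: rest) t = pvF rest (t.flatMap (pvSub c)) := by simp [pvF]
    rw [h1, ih, List.flatMap_assoc]
    apply List.flatMap_congr
    intro x _
    rw [← ih (pvSub c x)]
    simp [pvF]

lemma pvEscapeA_toList (s : String) :
    (pvEscapeA s).toList
      = pvF (s.toList.filter (fun c => !pvPlain c)) s.toList := by
  have aux : ∀ (cs : List Char) (t : String),
      (cs.foldl (fun t c =>
        if pvPlain c then t
        else PySem.Str.replace t (String.ofList [c]) (String.ofList (pvCHex c))) t).toList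
        = cs.foldl (fun t c => if pvPlain c then t else t.flatMap (pvSub c)) t.toList := by
    intro cs
    induction cs with
    | nil => intro t; simp
    | cons c rest ih =>
      intro t
      simp only [List.foldl_cons]
      by_cases h : pvPlain c
      · rw [if_pos h, if_pos h, ih]
      · rw [if_neg h, if_neg h, ih]
        congr 1
        rw [PySem.Str.toList_replace]
        simp only [String.toList_ofList]
        rw [pv_replace_single]
        rfl
  rw [pvEscapeA, aux, pvF, List.foldl_filter]
  congr 1
  funext t c
  by_cases h : pvPlain c <;> simp [h]

-- a string none of whose characters is substituted is fixed by pvF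
lemma pvF_fixed : ∀ (ev : List Char) (t : List Char), (∀ c ∈ ev, ∀ y ∈ t, y ≠ c) →
    pvF ev t = t := by
  intro ev
  induction ev with
  | nil => intro t _; simp [pvF]
  | cons c rest ih =>
    intro t h
    have hstep : t.flatMap (pvSub c) = t := by
      conv_rhs => rw [← List.flatMap_singleton' t]
      apply List.flatMap_congr
      intro y hy
      have : ¬ (y = c) := h c (by simp) y hy
      simp [pvSub, this]
    have h1 : pvF (c :: rest) t = pvF rest (t.flatMap (pvSub c)) := by simp [pvF]
    rw [h1, hstep]
    exact ih t (fun d hd y hy => h d (by simp [hd]) y hy)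

lemma pvPlain_hexDig : ∀ k, k < 16 → pvPlain (pvHexDig k) = true := by decide

-- an already-produced escape code is fixed by substitutions that contain no '*'
lemma pvF_chex (ev : List Char) (x : Char) (hx : x.toNat < 256)
    (hev : ∀ c ∈ ev, pvPlain c = false ∧ c ≠ '*') :
    pvF ev (pvCHex x) = pvCHex x := by
  apply pvF_fixed
  intro c hc y hy
  obtain ⟨hcp, hcs⟩ := hev c hc
  have h16a : x.toNat / 16 < 16 := by omega
  have h16b : x.toNat % 16 < 16 := by omega
  simp only [pvCHex, List.mem_cons, List.not_mem_nil, or_false] at hy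
  rcases hy with h | h | h <;> subst h
  · exact fun h => hcs h.symm
  · intro h
    rw [← h] at hcp
    rw [pvPlain_hexDig _ h16a] at hcp
    exact absurd hcp (by simp)
  · intro h
    rw [← h] at hcp
    rw [pvPlain_hexDig _ h16b] at hcp
    exact absurd hcp (by simp)

-- the two escapes agree whenever no '*' occurs after the first escaped character
lemma pv_escape_eq (s : String)
    (hdom : ∀ c ∈ s.toList, c.toNat < 256)
    (hbad : '*' ∉ (s.toList.filter (fun c => !pvPlain c)).drop 1) :
    pvEscapeA s = pvEscapeB s := by
  apply String.toList_inj.mp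
  rw [pvEscapeA_toList, pvEscapeB]
  simp only [String.toList_ofList]
  rw [pvF_flatMap]
  apply List.flatMap_congr
  intro x hxl
  by_cases hp : pvPlain x
  · rw [pvF_fixed]
    · simp [pvEsc1, hp]
    · intro c hc y hy
      simp only [List.mem_singleton] at hy
      subst hy
      intro h
      subst h
      simp only [List.mem_filter] at hc
      rw [hp] at hc
      simpa using hc.2
  · have hxev : x ∈ s.toList.filter (fun c => !pvPlain c) := by
      simp [List.mem_filter, hxl, hp]
    obtain ⟨ev1, ev2, hsplit, hx1⟩ := List.eq_append_cons_of_mem hxev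
    have hsub : ∀ c ∈ ev2, pvPlain c = false ∧ c ≠ '*' := by
      intro c hc
      constructor
      · have : c ∈ s.toList.filter (fun c => !pvPlain c) := by
          rw [hsplit]; simp [hc]
        simp only [List.mem_filter] at this
        simpa using this.2
      · intro hcs
        subst hcs
        apply hbad
        rw [hsplit]
        cases ev1 with
        | nil => simpa using hc
        | cons a t => simp [hc]
    rw [pvF, hsplit, List.foldl_append, List.foldl_cons]
    have h1 : List.foldl (fun t c => t.flatMap (pvSub c)) [x] ev1 = [x] := by
      have := pvF_fixed ev1 [x] (by
        intro c hc y hy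
        simp only [List.mem_singleton] at hy
        subst hy
        intro h; subst h; exact hx1 hc)
      simpa [pvF] using this
    rw [h1]
    have h2 : ([x].flatMap (pvSub x)) = pvCHex x := by simp [pvSub]
    rw [h2]
    have := pvF_chex ev2 x (hdom x hxl) hsub
    simp only [pvF] at this
    rw [this]
    simp [pvEsc1, hp]

lemma pvB_seconds : pvEscapeA "seconds" = "seconds" := by decide
lemma pvB_relative : pvEscapeA "RELATIVE" = "RELATIVE" := by decide
lemma pvB_local : pvEscapeA "Local" = "Local" := by decide
lemma pv_lower0 : PySem.Str.lower (PySem.Int.toStr 0) = "0" := by decide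
lemma pv_lower86400 : PySem.Str.lower (PySem.Int.toStr (-60 * 60 * 24)) = "-86400" := by decide

lemma pv_dom_lt256 (s : String) (h : pvDomStr s = true) : ∀ c ∈ s.toList, c.toNat < 256 := by
  intro c hc
  unfold pvDomStr at h
  rw [List.all_eq_true] at h
  have := h c hc
  unfold pvDomChar at this
  simp only [Bool.or_eq_true, Bool.and_eq_true, decide_eq_true_eq, beq_iff_eq] at this
  omega

-- ===== VERDICT (by name: the statement is the Claim_ definition above) =====
set_option maxRecDepth 4096 in
theorem cloudwatch_url_spec : Claim_unchanged_cloudwatch_url := by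
  intro slug cluster_name region hdom hnd
  unfold D_cloudwatch_url at hnd
  rw [not_or] at hnd
  obtain ⟨hnd1, hnd2⟩ := hnd
  unfold Dom_cloudwatch_url at hdom
  simp only [Bool.and_eq_true] at hdom
  have hslug : pvEscapeA slug = pvEscapeB slug :=
    pv_escape_eq slug (pv_dom_lt256 slug hdom.1.1) hnd1
  have hed : pvEscapeA ("fields @timestamp, @message\n| sort @timestamp desc\n| filter @logStream like /^" ++ cluster_name ++ "/\n| limit 200")
      = pvEscapeB ("fields @timestamp, @message\n| sort @timestamp desc\n| filter @logStream like /^" ++ cluster_name ++ "/\n| limit 200") := by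
    apply pv_escape_eq
    · have hf1' : ("fields @timestamp, @message\n| sort @timestamp desc\n| filter @logStream like /^".toList.all (fun c => decide (c.toNat < 256))) = true := by rfl
      have hf1 : ∀ c ∈ "fields @timestamp, @message\n| sort @timestamp desc\n| filter @logStream like /^".toList, c.toNat < 256 := by
        intro c hc
        simpa using List.all_eq_true.mp hf1' c hc
      have hf2' : ("/\n| limit 200".toList.all (fun c => decide (c.toNat < 256))) = true := by rfl
      have hf2 : ∀ c ∈ "/\n| limit 200".toList, c.toNat < 256 := by
        intro c hc
        simpa using List.all_eq_true.mp hf2' c hc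
      intro c hc
      simp only [String.toList_append] at hc
      rcases List.mem_append.mp hc with h | h
      · rcases List.mem_append.mp h with h | h
        · exact hf1 c h
        · exact pv_dom_lt256 cluster_name hdom.1.2 c h
      · exact hf2 c h
    · intro hmem
      have hstar : '*' ∈ (("fields @timestamp, @message\n| sort @timestamp desc\n| filter @logStream like /^" ++ cluster_name ++ "/\n| limit 200").toList.filter (fun c => !pvPlain c)) :=
        List.mem_of_mem_drop hmem
      simp only [List.mem_filter, String.toList_append] at hstar
      have hg1' : ("fields @timestamp, @message\n| sort @timestamp desc\n| filter @logStream like /^".toList.all (fun c => decide (c ≠ '*'))) = true := by rfl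
      have hg1 : '*' ∉ "fields @timestamp, @message\n| sort @timestamp desc\n| filter @logStream like /^".toList := fun h => by
        simpa using List.all_eq_true.mp hg1' '*' h
      have hg2' : ("/\n| limit 200".toList.all (fun c => decide (c ≠ '*'))) = true := by rfl
      have hg2 : '*' ∉ "/\n| limit 200".toList := fun h => by
        simpa using List.all_eq_true.mp hg2' '*' h
      rcases List.mem_append.mp hstar.1 with h | h
      · rcases List.mem_append.mp h with h | h
        · exact hg1 h
        · exact hnd2 h
      · exact hg2 h
  unfold cloudwatch_url pvGen cloudwatch_url_alt
  simp only [List.foldl_cons, List.foldl_nil, List.map_cons, List.map_nil,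
    hslug, hed, pvB_seconds, pvB_relative, pvB_local, pv_lower0, pv_lower86400,
    PySem.List.pyGet?, PySem.List.pyIdx?, PySem.Str.join, PySem.Chars.join_singleton]
  apply String.toList_inj.mp
  simp

set_option maxRecDepth 100000 in
set_option maxHeartbeats 4000000 in
theorem cloudwatch_url_changed : Claim_changed_cloudwatch_url := by
  unfold Claim_changed_cloudwatch_url
  decide
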